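-- pv_equiv track=rewrite | github.com/trungtin-dinh/photo_sonification | composition.py | build_scale_notes
-- ===== SOURCE A (Python) =====
-- from typing import Dict, List, Optional, Set, Tuple
--
-- def build_scale_notes(root: int, intervals: List[int], low: int, high: int) -> List[int]:
--     out = []
--     for octave in range(-3, 7):
--         for interval in intervals:
--             n = root + 12 * octave + interval
--             if low <= n <= high:
--                 out.append(n)
--     return sorted(set(out))
-- ===== SOURCE B (Python) =====
-- def build_scale_notes(root, intervals, low, high):
--     notes = set()
--     for interval in intervals:
--         o_min = max(-3, -((root + interval - low) // 12))
--         o_max = min(6, (high - root - interval) // 12)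
--         notes.update(root + 12 * o + interval for o in range(o_min, o_max + 1))
--     return sorted(notes)
-- ===== Notes on version B (the rewrite author's own statement) =====
-- stated objective: alternative
-- what changed: Instead of enumerating all 10 octaves per interval and testing low<=n<=high, B computes the valid octave window per interval analytically with integer ceil/floor division and generates exactly the in-range notes, with no filter branch.
import Mathlib
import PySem

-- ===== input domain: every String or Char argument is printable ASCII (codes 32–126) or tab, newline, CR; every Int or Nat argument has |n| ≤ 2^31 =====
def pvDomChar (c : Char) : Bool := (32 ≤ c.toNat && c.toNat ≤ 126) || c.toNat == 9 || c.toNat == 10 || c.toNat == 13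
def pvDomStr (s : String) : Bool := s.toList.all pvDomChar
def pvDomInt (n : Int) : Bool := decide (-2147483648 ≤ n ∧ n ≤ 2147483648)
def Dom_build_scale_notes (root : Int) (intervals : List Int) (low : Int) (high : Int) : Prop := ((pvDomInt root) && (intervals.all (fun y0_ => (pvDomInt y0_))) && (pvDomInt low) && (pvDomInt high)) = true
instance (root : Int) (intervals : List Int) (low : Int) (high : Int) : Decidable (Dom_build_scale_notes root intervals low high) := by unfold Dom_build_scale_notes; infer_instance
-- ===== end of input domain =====

-- B replaces A's "enumerate all 10 octaves and filter by range" with an analytically computed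
-- per-interval octave window (integer ceil/floor division), generating exactly the in-range notes.


-- ===== PORT A =====
def build_scale_notes (root : Int) (intervals : List Int) (low : Int) (high : Int) : List Int :=
  let out : List Int :=
    (PySem.List.pyRange (-3) 7 1).foldl (fun out octave =>
      intervals.foldl (fun out interval =>
        let n := root + 12 * octave + interval
        if low ≤ n ∧ n ≤ high then out ++ [n] else out) out) []
  PySem.List.sorted (PySem.Set.ofList out) (fun x => x) false

-- ===== PORT B =====
def build_scale_notes_alt (root : Int) (intervals : List Int) (low : Int) (high : Int) : List Int :=
  let notes : PySem.Set Int :=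
    intervals.foldl (fun notes interval =>
      let o_min := max (-3) (-(PySem.Int.floordiv (root + interval - low) 12))
      let o_max := min 6 (PySem.Int.floordiv (high - root - interval) 12)
      PySem.Set.update notes
        ((PySem.List.pyRange o_min (o_max + 1) 1).map (fun o => root + 12 * o + interval)))
      PySem.Set.empty
  PySem.List.sorted notes (fun x => x) false

-- ===== PRECONDITION & SPEC =====
def Spec_build_scale_notes (root : Int) (intervals : List Int) (low : Int) (high : Int) (out : List Int) : Prop := out = build_scale_notes_alt root intervals low high
instance (root : Int) (intervals : List Int) (low : Int) (high : Int) (out : List Int) : Decidable (Spec_build_scale_notes root intervals low high out) := by unfold Spec_build_scale_notes; infer_instance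

-- ===== CLAIM (what is proved, stated in full; the proofs are below) =====
def Claim_equal_build_scale_notes : Prop := ∀ (root : Int) (intervals : List Int) (low : Int) (high : Int), Dom_build_scale_notes root intervals low high → Spec_build_scale_notes root intervals low high (build_scale_notes root intervals low high)

-- ===== LEMMAS AND PROOFS =====

-- membership in A's inner loop (one octave row)
theorem mem_innerA (root octave low high x : Int) (intervals : List Int) (acc : List Int) :
    (x ∈ intervals.foldl (fun out interval =>
        if low ≤ root + 12 * octave + interval ∧ root + 12 * octave + interval ≤ high
        then out ++ [root + 12 * octave + interval] else out) acc) ↔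
    x ∈ acc ∨ ∃ interval ∈ intervals,
      (low ≤ root + 12 * octave + interval ∧ root + 12 * octave + interval ≤ high) ∧
      x = root + 12 * octave + interval := by
  induction intervals generalizing acc with
  | nil => simp
  | cons i t ih =>
    simp only [List.foldl_cons, ih, List.mem_cons]
    by_cases h : low ≤ root + 12 * octave + i ∧ root + 12 * octave + i ≤ high
    · simp only [if_pos h, List.mem_append, List.mem_singleton]
      constructor
      · rintro (⟨hx | hx⟩ | ⟨j, hj, hr, hx⟩)
        · exact Or.inl hx
        · exact Or.inr ⟨i, Or.inl rfl, h, hx⟩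
        · exact Or.inr ⟨j, Or.inr hj, hr, hx⟩
      · rintro (hx | ⟨j, hj | hj, hr, hx⟩)
        · exact Or.inl (Or.inl hx)
        · subst hj; exact Or.inl (Or.inr hx)
        · exact Or.inr ⟨j, hj, hr, hx⟩
    · simp only [if_neg h]
      constructor
      · rintro (hx | ⟨j, hj, hr, hx⟩)
        · exact Or.inl hx
        · exact Or.inr ⟨j, Or.inr hj, hr, hx⟩
      · rintro (hx | ⟨j, hj | hj, hr, hx⟩)
        · exact Or.inl hx
        · subst hj; exact absurd hr h
        · exact Or.inr ⟨j, hj, hr, hx⟩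

-- membership in A's collected list
theorem mem_outA (root : Int) (intervals : List Int) (low high x : Int) (L : List Int) (acc : List Int) :
    (x ∈ L.foldl (fun out octave =>
      intervals.foldl (fun out interval =>
        if low ≤ root + 12 * octave + interval ∧ root + 12 * octave + interval ≤ high
        then out ++ [root + 12 * octave + interval] else out) out) acc) ↔
    x ∈ acc ∨ ∃ octave ∈ L, ∃ interval ∈ intervals,
      (low ≤ root + 12 * octave + interval ∧ root + 12 * octave + interval ≤ high) ∧
      x = root + 12 * octave + interval := by
  induction L generalizing acc with
  | nil => simp
  | cons o t ih =>
    simp only [List.foldl_cons, ih, mem_innerA, List.mem_cons]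
    constructor
    · rintro (⟨hx | ⟨i, hi, hr, hx⟩⟩ | ⟨p, hp, i, hi, hr, hx⟩)
      · exact Or.inl hx
      · exact Or.inr ⟨o, Or.inl rfl, i, hi, hr, hx⟩
      · exact Or.inr ⟨p, Or.inr hp, i, hi, hr, hx⟩
    · rintro (hx | ⟨p, hp | hp, i, hi, hr, hx⟩)
      · exact Or.inl (Or.inl hx)
      · subst hp; exact Or.inl (Or.inr ⟨i, hi, hr, hx⟩)
      · exact Or.inr ⟨p, hp, i, hi, hr, hx⟩

-- membership in B's set (fold of updates)
theorem mem_notesB (root : Int) (intervals : List Int) (low high x : Int) (s : PySem.Set Int) :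
    (x ∈ intervals.foldl (fun notes interval =>
      PySem.Set.update notes
        ((PySem.List.pyRange (max (-3) (-(PySem.Int.floordiv (root + interval - low) 12)))
            (min 6 (PySem.Int.floordiv (high - root - interval) 12) + 1) 1).map
          (fun o => root + 12 * o + interval))) s) ↔
    x ∈ s ∨ ∃ interval ∈ intervals, ∃ o,
      (max (-3) (-(PySem.Int.floordiv (root + interval - low) 12)) ≤ o ∧
        o < min 6 (PySem.Int.floordiv (high - root - interval) 12) + 1) ∧
      x = root + 12 * o + interval := by
  induction intervals generalizing s with
  | nil => simp
  | cons i t ih =>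
    simp only [List.foldl_cons, ih, PySem.Set.mem_update, List.mem_map,
      PySem.List.mem_pyRange_one, List.mem_cons]
    constructor
    · rintro (⟨hs | ⟨o, ho, hx⟩⟩ | ⟨j, hj, o, ho, hx⟩)
      · exact Or.inl hs
      · exact Or.inr ⟨i, Or.inl rfl, o, ho, hx.symm⟩
      · exact Or.inr ⟨j, Or.inr hj, o, ho, hx⟩
    · rintro (hs | ⟨j, hj | hj, o, ho, hx⟩)
      · exact Or.inl (Or.inl hs)
      · subst hj; exact Or.inl (Or.inr ⟨o, ho, hx.symm⟩)
      · exact Or.inr ⟨j, hj, o, ho, hx⟩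

theorem nodup_notesB (root : Int) (intervals : List Int) (low high : Int) (s : PySem.Set Int)
    (hs : s.Nodup) :
    (intervals.foldl (fun notes interval =>
      PySem.Set.update notes
        ((PySem.List.pyRange (max (-3) (-(PySem.Int.floordiv (root + interval - low) 12)))
            (min 6 (PySem.Int.floordiv (high - root - interval) 12) + 1) 1).map
          (fun o => root + 12 * o + interval))) s).Nodup := by
  induction intervals generalizing s with
  | nil => exact hs
  | cons i t ih => exact ih _ (PySem.Set.nodup_update _ _ hs)

-- the analytic octave window equals the enumerate-and-filter window
theorem window_iff (root interval low high o : Int) :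
    (max (-3) (-(PySem.Int.floordiv (root + interval - low) 12)) ≤ o ∧
      o < min 6 (PySem.Int.floordiv (high - root - interval) 12) + 1) ↔
    ((-3 ≤ o ∧ o < 7) ∧
      low ≤ root + 12 * o + interval ∧ root + 12 * o + interval ≤ high) := by
  have hA : -o ≤ PySem.Int.floordiv (root + interval - low) 12 ↔ -o * 12 ≤ root + interval - low :=
    PySem.Int.le_floordiv_iff_mul_le (by norm_num)
  have hB : o ≤ PySem.Int.floordiv (high - root - interval) 12 ↔ o * 12 ≤ high - root - interval :=
    PySem.Int.le_floordiv_iff_mul_le (by norm_num)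
  generalize PySem.Int.floordiv (root + interval - low) 12 = A at hA ⊢
  generalize PySem.Int.floordiv (high - root - interval) 12 = B at hB ⊢
  omega

-- ===== VERDICT (by name: the statement is the Claim_ definition above) =====
theorem build_scale_notes_spec : Claim_equal_build_scale_notes := by
  intro root intervals low high _
  unfold Spec_build_scale_notes build_scale_notes build_scale_notes_alt
  dsimp only
  apply PySem.List.sorted_eq_sorted_of_perm _ _ _ (fun a b h => h)
  apply (List.perm_ext_iff_of_nodup (PySem.Set.nodup_ofList _)
    (nodup_notesB root intervals low high _ List.nodup_nil)).mpr
  intro x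
  rw [PySem.Set.mem_ofList, mem_outA, mem_notesB]
  simp only [List.not_mem_nil, false_or, PySem.List.mem_pyRange_one]
  constructor
  · rintro ⟨o, ho, i, hi, hr, hx⟩
    exact ⟨i, hi, o, (window_iff root i low high o).mpr ⟨ho, hr⟩, hx⟩
  · rintro ⟨i, hi, o, hw, hx⟩
    obtain ⟨ho, hr⟩ := (window_iff root i low high o).mp hw
    exact ⟨o, ho, i, hi, hr, hx⟩
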